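-- pv_equiv track=rewrite | github.com/tellewsen/CardGames | titusen/get_max_points.py | is_three_pairs
-- ===== SOURCE A (Python) =====
-- import collections
--
-- def is_three_pairs(die: tuple[int, ...]) -> bool:
--     """Check if we got three pairs"""
--     counts = collections.Counter(die)
--     if len(counts.keys()) != 3:
--         return False
--     for v in counts.values():
--         if v != 2:
--             return False
--     return True
-- ===== SOURCE B (Python) =====
-- def is_three_pairs(die):
--     """Check if we got three pairs"""
--     if len(die) != 6:
--         return False
--     s = sorted(die)
--     return s[0] == s[1] and s[2] == s[3] and s[4] == s[5] and s[1] != s[2] and s[3] != s[4]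
-- ===== Notes on version B (the rewrite author's own statement) =====
-- stated objective: simpler
-- what changed: Replaces Counter-based frequency counting (distinct-key count plus a loop over count values) with a length guard, one sort, and a fixed-position adjacency pattern check on the sorted list.
import Mathlib
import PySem

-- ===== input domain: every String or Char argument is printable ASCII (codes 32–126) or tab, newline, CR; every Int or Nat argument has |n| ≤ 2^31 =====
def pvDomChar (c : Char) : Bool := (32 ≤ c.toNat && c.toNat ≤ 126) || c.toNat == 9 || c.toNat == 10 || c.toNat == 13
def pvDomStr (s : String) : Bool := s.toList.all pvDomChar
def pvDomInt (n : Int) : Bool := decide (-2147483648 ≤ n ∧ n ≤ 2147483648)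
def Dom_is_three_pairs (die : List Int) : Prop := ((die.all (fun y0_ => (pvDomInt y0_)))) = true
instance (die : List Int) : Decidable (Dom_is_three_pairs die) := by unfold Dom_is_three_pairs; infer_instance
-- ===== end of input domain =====

-- B replaces A's Counter-based frequency check with a sort and a fixed-position adjacency pattern check (objective: simpler).

-- ===== PORT A =====
def is_three_pairs (die : List Int) : Bool :=
  let counts := PySem.Dict.counter die
  if counts.keys.length ≠ 3 then false
  else counts.values.all (fun v => v == 2)

-- ===== PORT B =====
def is_three_pairs_alt (die : List Int) : Bool :=
  if die.length ≠ 6 then false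
  else
    let s := PySem.List.sorted die (fun x => x) false
    (PySem.List.pyGet? s 0 == PySem.List.pyGet? s 1) && (PySem.List.pyGet? s 2 == PySem.List.pyGet? s 3) &&
      (PySem.List.pyGet? s 4 == PySem.List.pyGet? s 5) &&
      !(PySem.List.pyGet? s 1 == PySem.List.pyGet? s 2) && !(PySem.List.pyGet? s 3 == PySem.List.pyGet? s 4)

-- ===== PRECONDITION & SPEC =====
def Spec_is_three_pairs (die : List Int) (out : Bool) : Prop := out = is_three_pairs_alt die
instance (die : List Int) (out : Bool) : Decidable (Spec_is_three_pairs die out) := by unfold Spec_is_three_pairs; infer_instance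

-- ===== CLAIM (what is proved, stated in full; the proofs are below) =====
def Claim_equal_is_three_pairs : Prop := ∀ (die : List Int), Dom_is_three_pairs die → Spec_is_three_pairs die (is_three_pairs die)

-- ===== LEMMAS AND PROOFS =====

-- A in closed form: 3 distinct values, each occurring exactly twice
theorem is_three_pairs_char (die : List Int) :
    is_three_pairs die = true ↔
      (PySem.Set.ofList die).length = 3 ∧ ∀ x ∈ PySem.Set.ofList die, die.count x = 2 := by
  simp only [is_three_pairs, PySem.Dict.keys_counter, PySem.Dict.values, PySem.Dict.items_counter]
  by_cases h : (PySem.Set.ofList die).length = 3 <;>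
    simp [h, List.all_eq_true]
  constructor <;> · intro hcv x hx; have := hcv x hx; omega

theorem count_six (a b c v : Int) (hab : a ≠ b) (hbc : b ≠ c) (hac : a ≠ c) :
    ([a, a, b, b, c, c] : List Int).count v = if v = a ∨ v = b ∨ v = c then 2 else 0 := by
  by_cases h1 : v = a <;> by_cases h2 : v = b <;> by_cases h3 : v = c <;>
    simp_all [List.count_cons] <;> omega

theorem len6_shape (l : List Int) (h : l.length = 6) :
    ∃ a b c d e f, l = [a, b, c, d, e, f] := by
  match l, h with
  | [a, b, c, d, e, f], _ => exact ⟨a, b, c, d, e, f, rfl⟩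

theorem main_iff (die : List Int) : is_three_pairs die = true ↔ is_three_pairs_alt die = true := by
  have hperm : (PySem.List.sorted die (fun x => x) false).Perm die :=
    PySem.List.sorted_perm die (fun x => x) false
  constructor
  · -- A → B
    rw [is_three_pairs_char]
    rintro ⟨h3, hc⟩
    have hu_perm : (PySem.List.sorted (PySem.Set.ofList die) (fun x => x) false).Perm
        (PySem.Set.ofList die) := PySem.List.sorted_perm _ _ _
    have hu_lt := PySem.List.sorted_ofList_pairwise_lt (xs := die)
    have hu_len : (PySem.List.sorted (PySem.Set.ofList die) (fun x => x) false).length = 3 := by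
      rw [hu_perm.length_eq, h3]
    obtain ⟨p, q, r, hu⟩ : ∃ p q r,
        PySem.List.sorted (PySem.Set.ofList die) (fun x => x) false = [p, q, r] := by
      match hl : PySem.List.sorted (PySem.Set.ofList die) (fun x => x) false, hu_len with
      | [p, q, r], _ => exact ⟨p, q, r, rfl⟩
    rw [hu] at hu_perm hu_lt
    simp only [List.pairwise_cons, List.mem_cons, List.not_mem_nil] at hu_lt
    have hpq : p < q := by tauto
    have hqr : q < r := by tauto
    have hpr : p < r := hpq.trans hqr
    have hmem : ∀ v : Int, v ∈ die ↔ (v = p ∨ v = q ∨ v = r) := by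
      intro v
      rw [← PySem.Set.mem_ofList (xs := die), ← hu_perm.mem_iff]
      simp
    have hdperm : ([p, p, q, q, r, r] : List Int).Perm die := by
      rw [List.perm_iff_count]
      intro v
      rw [count_six p q r v hpq.ne hqr.ne hpr.ne]
      by_cases hv : v = p ∨ v = q ∨ v = r
      · rw [if_pos hv]
        have hvmem : v ∈ PySem.Set.ofList die := by
          rw [PySem.Set.mem_ofList, hmem]; exact hv
        exact (hc v hvmem).symm
      · rw [if_neg hv]
        have : v ∉ die := fun hin => hv ((hmem v).mp hin)
        exact (List.count_eq_zero_of_not_mem this).symm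
    have hpw6 : ([p, p, q, q, r, r] : List Int).Pairwise (fun x y => x ≤ y) := by
      simp
      try omega
    have hsorted : PySem.List.sorted die (fun x => x) false = [p, p, q, q, r, r] :=
      PySem.List.sorted_id_eq_of_perm_of_pairwise _ _ hdperm hpw6
    have hlen : die.length = 6 := by
      rw [← hdperm.length_eq]
      rfl
    simp only [is_three_pairs_alt, hlen, hsorted]
    simp [PySem.List.pyGet?, PySem.List.pyIdx?, hpq.ne, hqr.ne]
  · -- B → A
    intro hb
    simp only [is_three_pairs_alt] at hb
    by_cases hl : die.length = 6
    swap
    · simp [hl] at hb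
    simp only [hl] at hb
    have hslen : (PySem.List.sorted die (fun x => x) false).length = 6 := by
      rw [hperm.length_eq, hl]
    obtain ⟨a, b, c, d, e, f, hs⟩ := len6_shape _ hslen
    have hpw := PySem.List.sorted_pairwise die (fun x => x)
    rw [hs] at hb hpw hperm
    simp only [List.pairwise_cons, List.mem_cons, List.not_mem_nil] at hpw
    simp [PySem.List.pyGet?, PySem.List.pyIdx?] at hb
    obtain ⟨⟨⟨⟨hab, hcd⟩, hef⟩, hbc⟩, hde⟩ := hb
    subst hab hcd hef
    have hac : a < c := by
      have : a ≤ c := by tauto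
      omega
    have hce : c < e := by
      have : c ≤ e := by tauto
      omega
    have hae : a < e := hac.trans hce
    rw [is_three_pairs_char]
    have hmem : ∀ v : Int, v ∈ die ↔ (v = a ∨ v = c ∨ v = e) := by
      intro v
      rw [← hperm.mem_iff]
      simp
      try tauto
    have hcount : ∀ v : Int, die.count v = if v = a ∨ v = c ∨ v = e then 2 else 0 := by
      intro v
      rw [← hperm.count_eq]
      simpa using count_six a c e v hac.ne hce.ne hae.ne
    constructor
    · have hnd : (PySem.Set.ofList die).Nodup := PySem.Set.nodup_ofList die
      have hnd2 : ([a, c, e] : List Int).Nodup := by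
        simp [hac.ne, hce.ne, hae.ne]
      have : (PySem.Set.ofList die).Perm [a, c, e] := by
        rw [List.perm_ext_iff_of_nodup hnd hnd2]
        intro v
        rw [PySem.Set.mem_ofList, hmem]
        simp
      rw [this.length_eq]
      rfl
    · intro x hx
      rw [PySem.Set.mem_ofList, hmem] at hx
      rw [hcount x, if_pos hx]

-- ===== VERDICT (by name: the statement is the Claim_ definition above) =====
theorem is_three_pairs_spec : Claim_equal_is_three_pairs := by
  intro die _
  unfold Spec_is_three_pairs
  exact (Bool.eq_iff_iff.mpr (main_iff die))
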